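-- pv_equiv track=rewrite | github.com/FrAnKlInSousa/code_problems | src/code_problems/code_wars/kyu_7/decade_80_s_kids_1_how_many_licks_does_it_take.py | total_licks
-- ===== SOURCE A (Python) =====
-- def total_licks(env: dict):
--     licks = 252
--     high = -1
--     for k, v in env.items():
--         licks += v
--         high = max(high, v)
--     if high > 0:
--         for k, v in env.items():
--             if v == high:
--                 return (
--                     f'It took {licks} licks to get '
--                     f'to the tootsie roll center of '
--                     f'a tootsie pop. The toughest challenge was {k}.'
--                 )
--     return (
--         f'It took {licks} licks to get to the '
--         f'tootsie roll center of a tootsie pop.'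
--     )
-- ===== SOURCE B (Python) =====
-- def total_licks(env: dict):
--     licks = 252
--     high = -1
--     best = None
--     for k, v in env.items():
--         licks += v
--         if v > high:
--             high = v
--             best = k
--     if high > 0:
--         return (
--             f'It took {licks} licks to get '
--             f'to the tootsie roll center of '
--             f'a tootsie pop. The toughest challenge was {best}.'
--         )
--     return (
--         f'It took {licks} licks to get to the '
--         f'tootsie roll center of a tootsie pop.'
--     )
-- ===== Notes on version B (the rewrite author's own statement) =====
-- stated objective: simpler
-- what changed: B is a single pass that tracks the running total, the current maximum and the key that first attained it (strict > keeps the first occurrence), instead of A's max-fold followed by a second re-scan of the dict for the first key equal to the maximum.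
import Mathlib
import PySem

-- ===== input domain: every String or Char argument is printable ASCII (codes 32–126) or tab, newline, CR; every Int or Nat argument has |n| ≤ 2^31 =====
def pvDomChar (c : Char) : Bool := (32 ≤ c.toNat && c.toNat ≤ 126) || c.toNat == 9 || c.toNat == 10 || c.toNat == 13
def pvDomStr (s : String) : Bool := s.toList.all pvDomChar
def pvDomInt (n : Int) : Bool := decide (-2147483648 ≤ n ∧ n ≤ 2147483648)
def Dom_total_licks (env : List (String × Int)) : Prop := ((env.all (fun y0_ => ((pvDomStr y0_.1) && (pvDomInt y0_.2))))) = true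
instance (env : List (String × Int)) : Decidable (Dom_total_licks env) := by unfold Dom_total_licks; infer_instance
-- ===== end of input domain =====

-- B replaces A's max-fold plus second re-scan of the dict by a single pass that also
-- tracks the key that first attained the running maximum (objective: simpler).

-- ===== PORT A =====
-- f'It took {licks} licks to get to the tootsie roll center of a tootsie pop.'
def shortMsgA (licks : Int) : String :=
  "It took " ++ PySem.Int.toStr licks ++ " licks to get to the tootsie roll center of a tootsie pop."

-- the long f-string of A
def longMsgA (licks : Int) (k : String) : String :=
  "It took " ++ PySem.Int.toStr licks ++ " licks to get to the tootsie roll center of a tootsie pop. The toughest challenge was " ++ k ++ "."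

-- A's second loop: 'for k, v in env.items(): if v == high: return long' falling through to the short message
def scanA (licks high : Int) : List (String × Int) → String
  | [] => shortMsgA licks
  | (k, v) :: rest => if v == high then longMsgA licks k else scanA licks high rest

def total_licks (env : List (String × Int)) : String :=
  -- first loop: licks += v; high = max(high, v)
  let st := env.foldl (fun (st : Int × Int) p => (st.1 + p.2, max st.2 p.2)) (252, -1)
  if st.2 > 0 then scanA st.1 st.2 env else shortMsgA st.1

-- ===== PORT B =====
def total_licks_alt (env : List (String × Int)) : String :=
  -- single loop: licks += v; if v > high: high, best = v, k
  let st := env.foldl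
    (fun (st : Int × Int × Option String) p =>
      (st.1 + p.2, if p.2 > st.2.1 then (p.2, some p.1) else st.2))
    (252, -1, none)
  if st.2.1 > 0 then
    match st.2.2 with
    | some k =>
        "It took " ++ PySem.Int.toStr st.1 ++ " licks to get to the tootsie roll center of a tootsie pop. The toughest challenge was " ++ k ++ "."
    | none =>   -- unreachable: high > 0 implies best was set
        "It took " ++ PySem.Int.toStr st.1 ++ " licks to get to the tootsie roll center of a tootsie pop."
  else "It took " ++ PySem.Int.toStr st.1 ++ " licks to get to the tootsie roll center of a tootsie pop."

-- ===== PRECONDITION & SPEC =====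
def Spec_total_licks (env : List (String × Int)) (out : String) : Prop := out = total_licks_alt env
instance (env : List (String × Int)) (out : String) : Decidable (Spec_total_licks env out) := by unfold Spec_total_licks; infer_instance

-- ===== CLAIM (what is proved, stated in full; the proofs are below) =====
def Claim_equal_total_licks : Prop := ∀ (env : List (String × Int)), Dom_total_licks env → Spec_total_licks env (total_licks env)

-- ===== LEMMAS AND PROOFS =====

-- A's fold in closed components
theorem sum_shift (t : List (String × Int)) : ∀ (x : Int),
    t.foldl (fun s p => s + p.2) x = x + t.foldl (fun s p => s + p.2) 0 := by
  induction t with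
  | nil => intro x; simp
  | cons b u ih =>
      intro x
      simp only [List.foldl_cons]
      rw [ih (x + b.2), ih (0 + b.2)]
      ring

theorem foldA_eq (env : List (String × Int)) : ∀ (L H : Int),
    env.foldl (fun (st : Int × Int) p => (st.1 + p.2, max st.2 p.2)) (L, H)
      = (L + env.foldl (fun s p => s + p.2) 0, env.foldl (fun h p => max h p.2) H) := by
  induction env with
  | nil => intro L H; simp
  | cons a t ih =>
      intro L H
      simp only [List.foldl_cons]
      rw [ih (L + a.2) (max H a.2), sum_shift t (0 + a.2)]
      refine Prod.ext (by ring) rfl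

theorem le_maxFold (t : List (String × Int)) : ∀ (h : Int), h ≤ t.foldl (fun h p => max h p.2) h := by
  induction t with
  | nil => intro h; simp
  | cons a u ih =>
      intro h
      simp only [List.foldl_cons]
      exact le_trans (le_max_left h a.2) (ih (max h a.2))

-- when the max strictly exceeds the seed, it is attained: the scan for it succeeds
theorem find_max_isSome (env : List (String × Int)) : ∀ (H : Int),
    env.foldl (fun h p => max h p.2) H > H →
    (env.find? (fun p => p.2 == env.foldl (fun h p => max h p.2) H)).isSome := by
  induction env with
  | nil => intro H h; simp at h
  | cons a t ih =>
      intro H h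
      simp only [List.foldl_cons] at h ⊢
      by_cases hv : a.2 = t.foldl (fun h p => max h p.2) (max H a.2)
      · rw [List.find?_cons_of_pos (by simpa using hv)]; rfl
      · have hgt : t.foldl (fun h p => max h p.2) (max H a.2) > max H a.2 := by
          rcases lt_or_eq_of_le (le_maxFold t (max H a.2)) with h' | h'
          · exact h'
          · exfalso
            rw [← h'] at h hv
            rcases max_cases H a.2 with ⟨he, _⟩ | ⟨he, _⟩
            · rw [he] at h; omega
            · exact hv he.symm
        have := ih (max H a.2) hgt
        rw [List.find?_cons_of_neg (by simpa using hv)]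
        exact this

-- B's fold: total and max components match A's; best is the first key attaining the max
theorem foldB_eq (env : List (String × Int)) : ∀ (L H : Int) (b : Option String),
    env.foldl
      (fun (st : Int × Int × Option String) p =>
        (st.1 + p.2, if p.2 > st.2.1 then (p.2, some p.1) else st.2))
      (L, H, b)
    = (L + env.foldl (fun s p => s + p.2) 0,
       env.foldl (fun h p => max h p.2) H,
       if env.foldl (fun h p => max h p.2) H > H
         then (env.find? (fun p => p.2 == env.foldl (fun h p => max h p.2) H)).map Prod.fst
         else b) := by
  induction env with
  | nil => intro L H b; simp
  | cons a t ih =>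
      intro L H b
      simp only [List.foldl_cons]
      by_cases hgt : a.2 > H
      · -- update fires: state becomes (L + a.2, a.2, some a.1); max H a.2 = a.2
        rw [if_pos hgt, ih (L + a.2) a.2 (some a.1)]
        have hm : max H a.2 = a.2 := max_eq_right (le_of_lt hgt)
        rw [hm, sum_shift t (0 + a.2)]
        refine Prod.ext (by ring) (Prod.ext rfl ?_)
        have hle := le_maxFold t a.2
        have hcond : t.foldl (fun h p => max h p.2) a.2 > H := lt_of_lt_of_le hgt hle
        rw [if_pos hcond]
        rcases lt_or_eq_of_le hle with h' | h'
        · -- the max is strictly above a.2, so a is not the found element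
          rw [if_pos h', List.find?_cons_of_neg (by simp; omega)]
        · -- the max IS a.2: a is the first element attaining it
          rw [if_neg (by omega), List.find?_cons_of_pos (by simp [← h'])]
          rfl
      · -- no update: state stays (L + a.2, H, b); max H a.2 = H
        rw [if_neg hgt, ih (L + a.2) H b]
        have hm : max H a.2 = H := max_eq_left (by omega)
        rw [hm, sum_shift t (0 + a.2)]
        refine Prod.ext (by ring) (Prod.ext rfl ?_)
        by_cases hc : t.foldl (fun h p => max h p.2) H > H
        · rw [if_pos hc, if_pos hc, List.find?_cons_of_neg (by simp; omega)]
        · rw [if_neg hc, if_neg hc]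

-- A's second loop IS a find? over env
theorem scanA_eq_find (licks high : Int) (env : List (String × Int)) :
    scanA licks high env =
      match env.find? (fun p => p.2 == high) with
      | some p => longMsgA licks p.1
      | none => shortMsgA licks := by
  induction env with
  | nil => rfl
  | cons a t ih =>
      by_cases h : a.2 = high
      · rw [List.find?_cons_of_pos (by simpa using h)]
        simp [scanA, h]
      · rw [List.find?_cons_of_neg (by simpa using h)]
        simp only [scanA]
        rw [if_neg (by simpa using h)]
        exact ih

-- ===== VERDICT (by name: the statement is the Claim_ definition above) =====
theorem total_licks_spec : Claim_equal_total_licks := by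
  intro env _
  unfold Spec_total_licks total_licks total_licks_alt
  rw [foldA_eq env 252 (-1), foldB_eq env 252 (-1) none]
  simp only []
  set M := env.foldl (fun h p => max h p.2) (-1) with hM
  set L := 252 + env.foldl (fun s p => s + p.2) 0 with hL
  by_cases hpos : M > 0
  · rw [if_pos hpos, if_pos hpos, if_pos (by omega : M > -1)]
    rw [scanA_eq_find]
    have hs := find_max_isSome env (-1) (by omega)
    rw [← hM] at hs
    cases hfind : env.find? (fun p => p.2 == M) with
    | none => rw [hfind] at hs; simp at hs
    | some p => simp [longMsgA]
  · rw [if_neg hpos, if_neg hpos]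
    simp [shortMsgA]
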